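-- pv_equiv track=rewrite | github.com/farshi/oneminuta | libs/coord-spherical/sphericode.py | morton_encode
-- ===== SOURCE A (Python) =====
-- def morton_encode(x: int, y: int, bits_per_axis: int) -> int:
--     """
--     Morton encode two integers by interleaving their bits.
--
--     Args:
--         x, y: Integer coordinates
--         bits_per_axis: Number of bits per coordinate
--
--     Returns:
--         Morton encoded integer
--     """
--     result = 0
--     for i in range(bits_per_axis):
--         # Interleave bits: x bit goes to even positions, y bit goes to odd positions
--         if x & (1 << i):
--             result |= (1 << (2 * i))
--         if y & (1 << i):
--             result |= (1 << (2 * i + 1))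
--     return result
-- ===== SOURCE B (Python) =====
-- # Table-driven Morton encode — mask both coordinates once, then interleave a
-- # byte at a time via a precomputed 256-entry bit-spread table (built once with
-- # shift/mask magic constants), adding each 16-bit chunk at its position.
-- def _spread8(v):
--     v = (v | (v << 4)) & 0x0F0F
--     v = (v | (v << 2)) & 0x3333
--     v = (v | (v << 1)) & 0x5555
--     return v
--
-- _MORTON = [_spread8(i) for i in range(256)]
--
-- def morton_encode(x: int, y: int, bits_per_axis: int) -> int:
--     if bits_per_axis <= 0:
--         return 0
--     mask = (1 << bits_per_axis) - 1
--     xm = x & mask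
--     ym = y & mask
--     result = 0
--     shift = 0
--     while xm or ym:
--         result += (_MORTON[xm & 255] + 2 * _MORTON[ym & 255]) << shift
--         xm >>= 8
--         ym >>= 8
--         shift += 16
--     return result
-- ===== Notes on version B (the rewrite author's own statement) =====
-- stated objective: faster
-- what changed: Replaces the per-bit loop over range(bits_per_axis) (testing one bit of x and y per iteration and OR-ing single bits in) by masking both coordinates once and then interleaving a byte at a time through a precomputed 256-entry bit-spread table (built once with shift/mask magic constants), stopping as soon as both masked values are exhausted.
import Mathlib
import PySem

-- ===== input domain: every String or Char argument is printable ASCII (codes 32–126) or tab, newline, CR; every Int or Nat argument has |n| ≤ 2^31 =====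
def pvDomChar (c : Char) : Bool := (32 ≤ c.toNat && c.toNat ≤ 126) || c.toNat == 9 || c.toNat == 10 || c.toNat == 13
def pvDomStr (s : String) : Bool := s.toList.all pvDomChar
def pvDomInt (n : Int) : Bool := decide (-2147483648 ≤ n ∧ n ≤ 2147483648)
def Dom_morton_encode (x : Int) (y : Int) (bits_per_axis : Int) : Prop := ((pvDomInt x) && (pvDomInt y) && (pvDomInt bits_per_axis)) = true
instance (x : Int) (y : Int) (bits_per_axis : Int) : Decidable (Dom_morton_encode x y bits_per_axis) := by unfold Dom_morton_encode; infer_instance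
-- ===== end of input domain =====

-- B replaces A's per-bit loop by a table-driven byte-at-a-time interleave (masks both
-- coordinates once, then consumes them 8 bits per iteration via a 256-entry spread table);
-- measurably faster by a constant factor.

-- ===== PORT A =====
-- Python's 'a << k' is core Lean's 'a <<< k' with k : Nat (PYSEM); shl fixes that instance
def shl (a : Int) (k : Nat) : Int := a <<< k

-- literal port of A: for i in range(bits_per_axis): test bit i of x and y, OR single bits in.
-- (shift amounts i, 2*i, 2*i+1 are ≥ 0 for every i produced by range, so .toNat is exact)
def morton_encode (x : Int) (y : Int) (bits_per_axis : Int) : Int :=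
  (PySem.List.pyRange 0 bits_per_axis 1).foldl (fun result i =>
    let result := if PySem.Int.band x (shl 1 i.toNat) ≠ 0
                  then PySem.Int.bor result (shl 1 (2*i).toNat) else result
    if PySem.Int.band y (shl 1 i.toNat) ≠ 0
    then PySem.Int.bor result (shl 1 (2*i+1).toNat) else result) 0

-- ===== PORT B =====
-- _spread8: 3 shift/mask magic steps spreading the 8 bits of a byte to even positions
def spread8 (v : Int) : Int :=
  let v1 := PySem.Int.band (PySem.Int.bor v (shl v 4)) 0x0F0F
  let v2 := PySem.Int.band (PySem.Int.bor v1 (shl v1 2)) 0x3333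
  PySem.Int.band (PySem.Int.bor v2 (shl v2 1)) 0x5555

-- _MORTON = [_spread8(i) for i in range(256)]
def mortonTable : List Int := (PySem.List.pyRange 0 256 1).map spread8

-- the while loop of B; xm, ym are the masked coordinates (x & mask ≥ 0 since mask ≥ 0),
-- carried as Nat so that the loop's termination is structural in their value;
-- _MORTON[i] is indexed with 0 ≤ i < 256 always, so the total pyGetD is exact
def mortonLoop : Nat → Nat → Int → Nat → Int
  | xm, ym, result, shift =>
    if xm ≠ 0 ∨ ym ≠ 0 then
      mortonLoop (xm >>> 8) (ym >>> 8)
        (result + shl (PySem.List.pyGetD mortonTable ((xm &&& 255 : Nat) : Int) 0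
                    + 2 * PySem.List.pyGetD mortonTable ((ym &&& 255 : Nat) : Int) 0) shift)
        (shift + 16)
    else result
  termination_by xm ym _ _ => xm + ym
  decreasing_by
    simp only [Nat.shiftRight_eq_div_pow]
    rename_i h
    rcases Nat.eq_zero_or_pos xm with hx | hx <;> rcases Nat.eq_zero_or_pos ym with hy | hy <;>
      simp_all <;> omega

def morton_encode_alt (x : Int) (y : Int) (bits_per_axis : Int) : Int :=
  if bits_per_axis ≤ 0 then 0
  else
    let mask : Int := shl 1 bits_per_axis.toNat - 1
    mortonLoop (PySem.Int.band x mask).toNat (PySem.Int.band y mask).toNat 0 0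

-- ===== PRECONDITION & SPEC =====
def Spec_morton_encode (x : Int) (y : Int) (bits_per_axis : Int) (out : Int) : Prop := out = morton_encode_alt x y bits_per_axis
instance (x : Int) (y : Int) (bits_per_axis : Int) (out : Int) : Decidable (Spec_morton_encode x y bits_per_axis out) := by unfold Spec_morton_encode; infer_instance

-- ===== CLAIM (what is proved, stated in full; the proofs are below) =====
def Claim_equal_morton_encode : Prop := ∀ (x : Int) (y : Int) (bits_per_axis : Int), Dom_morton_encode x y bits_per_axis → Spec_morton_encode x y bits_per_axis (morton_encode x y bits_per_axis)

-- ===== LEMMAS AND PROOFS =====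

/-- Reference value: interleaving of the low `n` bits of `x` and `y`
    (bit `i` of `x` at position `2i`, bit `i` of `y` at position `2i+1`). -/
def ilv : Nat → Int → Int → Int
  | 0, _, _ => 0
  | n+1, x, y => (x % 2 + 2 * (y % 2)) + 4 * ilv n (x / 2) (y / 2)

theorem ilv_zero (n : Nat) : ilv n 0 0 = 0 := by
  induction n with
  | zero => rfl
  | succ n ih => simp [ilv, ih]

theorem ilv_nonneg (n : Nat) (x y : Int) : 0 ≤ ilv n x y := by
  induction n generalizing x y with
  | zero => simp [ilv]
  | succ n ih =>
    have h1 := Int.emod_nonneg x (by norm_num : (2:Int) ≠ 0)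
    have h2 := Int.emod_nonneg y (by norm_num : (2:Int) ≠ 0)
    have := ih (x / 2) (y / 2)
    simp only [ilv]; omega

theorem ilv_lt (n : Nat) (x y : Int) : ilv n x y < 4 ^ n := by
  induction n generalizing x y with
  | zero => simp [ilv]
  | succ n ih =>
    have h1 : x % 2 < 2 := Int.emod_lt_of_pos x (by norm_num)
    have h2 : y % 2 < 2 := Int.emod_lt_of_pos y (by norm_num)
    have := ih (x / 2) (y / 2)
    simp only [ilv, pow_succ]
    omega

theorem ilv_chunk (k m : Nat) (x y : Int) :
    ilv (k + m) x y = ilv k x y + 4 ^ k * ilv m (x / 2 ^ k) (y / 2 ^ k) := by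
  induction k generalizing x y with
  | zero => simp [ilv]
  | succ k ih =>
    have hx : x / 2 / 2 ^ k = x / 2 ^ (k + 1) := by
      rw [Int.ediv_ediv_of_nonneg (by norm_num), ← pow_succ']
    have hy : y / 2 / 2 ^ k = y / 2 ^ (k + 1) := by
      rw [Int.ediv_ediv_of_nonneg (by norm_num), ← pow_succ']
    have : k + 1 + m = (k + m) + 1 := by omega
    rw [this]
    simp only [ilv, ih (x / 2) (y / 2), hx, hy, pow_succ]
    ring

theorem ilv_succ_top (n : Nat) (x y : Int) :
    ilv (n + 1) x y = ilv n x y + 4 ^ n * (x / 2 ^ n % 2 + 2 * (y / 2 ^ n % 2)) := by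
  have h1 : ilv 1 (x / 2 ^ n) (y / 2 ^ n) = x / 2 ^ n % 2 + 2 * (y / 2 ^ n % 2) := by
    simp [ilv]
  rw [ilv_chunk n 1 x y, h1]

theorem ilv_split (n : Nat) (x y : Int) : ilv n x y = ilv n x 0 + 2 * ilv n y 0 := by
  induction n generalizing x y with
  | zero => simp [ilv]
  | succ n ih =>
    simp only [ilv, ih (x / 2) (y / 2)]
    norm_num
    ring

/-- `x = -m - 1` division/remainder by a power of two, in terms of `m`'s. -/
theorem neg_ediv_emod (m k : Nat) :
    (-(m:Int) - 1) / 2 ^ k = -((m / 2 ^ k : Nat) : Int) - 1 ∧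
    (-(m:Int) - 1) % 2 ^ k = 2 ^ k - 1 - ((m % 2 ^ k : Nat) : Int) := by
  have hp : (0:Int) < 2 ^ k := by positivity
  have hm : (m : Int) = 2 ^ k * ((m / 2 ^ k : Nat) : Int) + ((m % 2 ^ k : Nat) : Int) := by
    exact_mod_cast (Nat.div_add_mod m (2 ^ k)).symm
  have hr : ((m % 2 ^ k : Nat) : Int) < 2 ^ k := by
    exact_mod_cast Nat.mod_lt m (by positivity)
  have hr0 : (0:Int) ≤ ((m % 2 ^ k : Nat) : Int) := by positivity
  have hx : (-(m:Int) - 1) =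
      (2 ^ k - 1 - ((m % 2 ^ k : Nat) : Int)) + (-((m / 2 ^ k : Nat) : Int) - 1) * 2 ^ k := by
    rw [hm]; ring
  have hdiv : (-(m:Int) - 1) / 2 ^ k = -((m / 2 ^ k : Nat) : Int) - 1 := by
    rw [hx, Int.add_mul_ediv_right _ _ (by omega : (2:Int) ^ k ≠ 0),
      Int.ediv_eq_zero_of_lt (by omega) (by omega)]
    ring
  refine ⟨hdiv, ?_⟩
  rw [Int.emod_def, hdiv]
  rw [hm]; ring

/-- `x & (1 << k)` is `2^k` exactly when bit `k` of `x` (two's complement) is set. -/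
theorem band_two_pow (x : Int) (k : Nat) :
    PySem.Int.band x (shl 1 k) = if x / 2 ^ k % 2 = 1 then (2:Int) ^ k else 0 := by
  have hsh : shl 1 k = 2 ^ k := by rw [shl, Int.shiftLeft_eq, one_mul]
  have h2 : (0:Int) ≤ 2 ^ k := by positivity
  have hcast : ((2 ^ k : Nat) : Int) = 2 ^ k := by push_cast; ring
  have ht : ((2:Int) ^ k).toNat = 2 ^ k := by rw [← hcast, Int.toNat_natCast]
  rw [hsh]
  unfold PySem.Int.band
  by_cases hx : 0 ≤ x
  · simp only [hx, h2, if_true]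
    rw [ht, Nat.and_two_pow, Nat.testBit_eq_decide_div_mod_eq]
    have hxc : x = ((x.toNat : Nat) : Int) := by omega
    have hd : x / 2 ^ k % 2 = ((x.toNat / 2 ^ k % 2 : Nat) : Int) := by
      rw [Int.natCast_mod, Int.natCast_div, Int.natCast_pow, ← hxc]
      norm_num
    by_cases hb : x.toNat / 2 ^ k % 2 = 1
    · simp [hb, hd, hcast]
    · have hnot : ¬ (x / 2 ^ k % 2 = 1) := by rw [hd]; exact_mod_cast hb
      simp [hb, hnot]
  · simp only [hx, h2, if_true, if_false]
    have hm : x = -(((-x - 1).toNat : Nat) : Int) - 1 := by omega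
    set m : Nat := (-x - 1).toNat with hmdef
    have hdiv' : x / 2 ^ k = -((m / 2 ^ k : Nat) : Int) - 1 := by
      rw [hm]; exact (neg_ediv_emod m k).1
    rw [hdiv', ht, Nat.land_comm, Nat.and_two_pow, Nat.testBit_eq_decide_div_mod_eq]
    rcases (by omega : m / 2 ^ k % 2 = 0 ∨ m / 2 ^ k % 2 = 1) with hq | hq
    · have hqz : ((m / 2 ^ k : Nat) : Int) % 2 = 0 := by omega
      have hcond : (-((m / 2 ^ k : Nat) : Int) - 1) % 2 = 1 := by omega
      rw [if_pos hcond, hq]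
      norm_num [hcast]
    · have hqz : ((m / 2 ^ k : Nat) : Int) % 2 = 1 := by omega
      have hcond : ¬ ((-((m / 2 ^ k : Nat) : Int) - 1) % 2 = 1) := by omega
      rw [if_neg hcond, hq]
      norm_num
/-- `x & ((1 << n) - 1)` is `x mod 2^n`. -/
theorem band_mask (x : Int) (n : Nat) :
    PySem.Int.band x (shl 1 n - 1) = x % 2 ^ n := by
  have hcast : ((2 ^ n : Nat) : Int) = 2 ^ n := by push_cast; ring
  have h1n : (0:Nat) < 2 ^ n := by positivity
  have hsh : shl 1 n - 1 = 2 ^ n - 1 := by rw [shl, Int.shiftLeft_eq, one_mul]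
  have h2 : (0:Int) ≤ 2 ^ n - 1 := by
    have : ((2 ^ n : Nat) : Int) ≤ 2 ^ n := le_of_eq hcast
    omega
  have ht : ((2:Int) ^ n - 1).toNat = 2 ^ n - 1 := by omega
  rw [hsh]
  unfold PySem.Int.band
  by_cases hx : 0 ≤ x
  · simp only [hx, h2, if_true]
    rw [ht, Nat.and_two_pow_sub_one_eq_mod]
    have hxc : x = ((x.toNat : Nat) : Int) := by omega
    rw [Int.natCast_mod, Int.natCast_pow, ← hxc]
    norm_num
  · simp only [hx, h2, if_true, if_false]
    have hm : x = -(((-x - 1).toNat : Nat) : Int) - 1 := by omega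
    set m : Nat := (-x - 1).toNat with hmdef
    have hmod' : x % 2 ^ n = 2 ^ n - 1 - ((m % 2 ^ n : Nat) : Int) := by
      rw [hm]; exact (neg_ediv_emod m n).2
    rw [hmod', ht, Nat.land_comm, Nat.and_two_pow_sub_one_eq_mod]
    have hlt : m % 2 ^ n < 2 ^ n := Nat.mod_lt m h1n
    have hle : m % 2 ^ n ≤ 2 ^ n - 1 := by omega
    rw [Nat.cast_sub hle, Nat.cast_sub (by omega : (1:Nat) ≤ 2 ^ n)]
    push_cast
    ring
/-- low bits of `x % 2^n` are the low bits of `x`. -/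
theorem emod_bit (x : Int) (n i : Nat) (h : i < n) :
    (x % 2 ^ n) / 2 ^ i % 2 = x / 2 ^ i % 2 := by
  have hpow : (2:Int) ^ (n - i - 1) * 2 * 2 ^ i = 2 ^ n := by
    rw [mul_assoc, (show (2:Int) * 2 ^ i = 2 ^ (i + 1) by rw [pow_succ]; ring), ← pow_add]
    congr 1
    omega
  have hsplit : x % 2 ^ n = x + (-(2 ^ (n - i - 1) * 2 * (x / 2 ^ n))) * 2 ^ i := by
    rw [Int.emod_def]
    linear_combination (x / 2 ^ n) * hpow
  rw [hsplit, Int.add_mul_ediv_right _ _ (by positivity : (2:Int) ^ i ≠ 0)]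
  have heven : (2:Int) ^ (n - i - 1) * 2 * (x / 2 ^ n) = 2 * (2 ^ (n - i - 1) * (x / 2 ^ n)) := by
    ring
  omega

theorem ilv_cong (n : Nat) (x x' y y' : Int)
    (hx : ∀ i < n, x / 2 ^ i % 2 = x' / 2 ^ i % 2)
    (hy : ∀ i < n, y / 2 ^ i % 2 = y' / 2 ^ i % 2) :
    ilv n x y = ilv n x' y' := by
  induction n generalizing x x' y y' with
  | zero => rfl
  | succ n ih =>
    have h0x := hx 0 (by omega)
    have h0y := hy 0 (by omega)
    simp only [pow_zero, Int.ediv_one] at h0x h0y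
    have hrx : ∀ i < n, (x / 2) / 2 ^ i % 2 = (x' / 2) / 2 ^ i % 2 := by
      intro i hi
      rw [Int.ediv_ediv_of_nonneg (by norm_num), Int.ediv_ediv_of_nonneg (by norm_num),
        ← pow_succ']
      exact hx (i+1) (by omega)
    have hry : ∀ i < n, (y / 2) / 2 ^ i % 2 = (y' / 2) / 2 ^ i % 2 := by
      intro i hi
      rw [Int.ediv_ediv_of_nonneg (by norm_num), Int.ediv_ediv_of_nonneg (by norm_num),
        ← pow_succ']
      exact hy (i+1) (by omega)
    simp only [ilv, h0x, h0y, ih (x/2) (x'/2) (y/2) (y'/2) hrx hry]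

theorem ilv_mod (n : Nat) (x y : Int) : ilv n (x % 2 ^ n) (y % 2 ^ n) = ilv n x y :=
  ilv_cong n _ x _ y (fun i hi => emod_bit x n i hi) (fun i hi => emod_bit y n i hi)

-- ===== A-side =====

/-- OR-ing a fresh higher bit into a nonnegative accumulator is addition. -/
theorem bor_bit (r : Int) (j : Nat) (h0 : 0 ≤ r) (hr : r < 2 ^ j) :
    PySem.Int.bor r (shl 1 j) = r + 2 ^ j := by
  have hcast : ((2 ^ j : Nat) : Int) = 2 ^ j := by push_cast; ring
  rw [shl, Int.shiftLeft_eq, one_mul, PySem.Int.bor_of_nonneg h0 (by positivity)]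
  have ht : ((2:Int) ^ j).toNat = 2 ^ j := by rw [← hcast, Int.toNat_natCast]
  rw [ht, Nat.lor_comm]
  have hlt : r.toNat < 2 ^ j := by omega
  have hor := Nat.two_pow_add_eq_or_of_lt hlt 1
  rw [mul_one] at hor
  rw [← hor]
  push_cast
  omega

theorem morton_encode_eq_ilv (x y : Int) (n : Nat) :
    morton_encode x y (n : Int) = ilv n x y := by
  unfold morton_encode
  induction n with
  | zero =>
    rw [(show ((0:Nat):Int) = 0 by rfl), PySem.List.pyRange_one_eq_nil le_rfl]
    rfl
  | succ n ih =>
    have hc : ((n + 1 : Nat) : Int) = (n : Int) + 1 := by push_cast; ring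
    rw [hc, PySem.List.pyRange_one_succ_right (by positivity), List.foldl_append,
      List.foldl_cons, List.foldl_nil, ih]
    have e1 : ((n : Int)).toNat = n := Int.toNat_natCast n
    have e2 : ((2 * (n : Int))).toNat = 2 * n := by omega
    have e3 : ((2 * (n : Int) + 1)).toNat = 2 * n + 1 := by omega
    simp only [e1, e2, e3, band_two_pow]
    have h4 : (4:Int) ^ n = 2 ^ (2 * n) := by
      rw [(show (4:Int) = 2 ^ 2 by norm_num), ← pow_mul]
    have h5 : (2:Int) ^ (2 * n + 1) = 2 ^ (2 * n) * 2 := pow_succ 2 (2 * n)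
    have hnz : (2:Int) ^ n ≠ 0 := by positivity
    have h0 : 0 ≤ ilv n x y := ilv_nonneg n x y
    have hlt : ilv n x y < 2 ^ (2 * n) := by rw [← h4]; exact ilv_lt n x y
    rw [ilv_succ_top]
    rcases (by omega : x / 2 ^ n % 2 = 0 ∨ x / 2 ^ n % 2 = 1) with hbx | hbx <;>
      rcases (by omega : y / 2 ^ n % 2 = 0 ∨ y / 2 ^ n % 2 = 1) with hby | hby
    · simp only [hbx, hby]
      norm_num
    · simp only [hbx, hby]
      norm_num
      rw [bor_bit _ _ h0 (by omega)]
      omega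
    · simp only [hbx, hby]
      norm_num
      rw [bor_bit _ _ h0 hlt]
      omega
    · simp only [hbx, hby]
      norm_num
      rw [bor_bit _ _ h0 hlt, bor_bit _ _ (by omega) (by omega)]
      omega

-- ===== B-side =====

set_option maxRecDepth 100000 in
set_option maxHeartbeats 1000000 in
theorem spread8_ok : ∀ c : Nat, c < 256 → spread8 (c : Int) = ilv 8 (c : Int) 0 := by
  decide

theorem tbl (c : Nat) (hc : c < 256) :
    PySem.List.pyGetD mortonTable ((c : Nat) : Int) 0 = ilv 8 (c : Int) 0 := by
  have h := PySem.List.pyGetD_map_pyRange spread8 256 c 0 hc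
  have h256 : ((256 : Nat) : Int) = (256 : Int) := by norm_num
  rw [h256] at h
  rw [(show mortonTable = (PySem.List.pyRange 0 256 1).map spread8 from rfl)]
  rw [h]
  exact spread8_ok c hc

theorem mortonLoop_eq (n : Nat) : ∀ (xm ym : Nat) (r : Int) (s : Nat),
    xm < 2 ^ (8 * n) → ym < 2 ^ (8 * n) →
    mortonLoop xm ym r s = r + ilv (8 * n) (xm : Int) (ym : Int) * 2 ^ s := by
  induction n with
  | zero =>
    intro xm ym r s hx hy
    have hx0 : xm = 0 := by simpa using hx
    have hy0 : ym = 0 := by simpa using hy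
    subst hx0; subst hy0
    rw [mortonLoop]
    simp [ilv]
  | succ n ih =>
    intro xm ym r s hx hy
    rw [mortonLoop]
    by_cases hz : xm = 0 ∧ ym = 0
    · obtain ⟨h1, h2⟩ := hz
      subst h1; subst h2
      simp [ilv_zero]
    · have hcond : xm ≠ 0 ∨ ym ≠ 0 := by tauto
      rw [if_pos hcond]
      have hxd : xm >>> 8 = xm / 256 := by rw [Nat.shiftRight_eq_div_pow]
      have hyd : ym >>> 8 = ym / 256 := by rw [Nat.shiftRight_eq_div_pow]
      have hpow : (2:Nat) ^ (8 * (n + 1)) = 2 ^ (8 * n) * 256 := by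
        rw [(show 8 * (n + 1) = 8 * n + 8 by ring), pow_add]; norm_num
      have hx' : xm / 256 < 2 ^ (8 * n) := by
        rw [Nat.div_lt_iff_lt_mul (by norm_num)]; omega
      have hy' : ym / 256 < 2 ^ (8 * n) := by
        rw [Nat.div_lt_iff_lt_mul (by norm_num)]; omega
      rw [hxd, hyd, ih _ _ _ _ hx' hy']
      have hm1 : xm &&& 255 = xm % 256 := by
        have h := Nat.and_two_pow_sub_one_eq_mod xm 8
        norm_num at h
        exact h
      have hm2 : ym &&& 255 = ym % 256 := by
        have h := Nat.and_two_pow_sub_one_eq_mod ym 8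
        norm_num at h
        exact h
      rw [hm1, hm2, tbl (xm % 256) (by omega), tbl (ym % 256) (by omega)]
      have hv : ilv 8 ((xm % 256 : Nat) : Int) 0 + 2 * ilv 8 ((ym % 256 : Nat) : Int) 0
          = ilv 8 (xm : Int) (ym : Int) := by
        rw [← ilv_split]
        have e1 : ((xm % 256 : Nat) : Int) = (xm : Int) % 2 ^ 8 := by
          rw [Int.natCast_mod]; norm_num
        have e2 : ((ym % 256 : Nat) : Int) = (ym : Int) % 2 ^ 8 := by
          rw [Int.natCast_mod]; norm_num
        rw [e1, e2, ilv_mod]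
      have hchunk : ilv (8 * (n + 1)) (xm : Int) (ym : Int)
          = ilv 8 (xm : Int) (ym : Int)
            + 4 ^ 8 * ilv (8 * n) ((xm : Int) / 2 ^ 8) ((ym : Int) / 2 ^ 8) := by
        rw [(show 8 * (n + 1) = 8 + 8 * n by ring), ilv_chunk]
      have hdx : ((xm / 256 : Nat) : Int) = (xm : Int) / 2 ^ 8 := by
        rw [Int.natCast_div]; norm_num
      have hdy : ((ym / 256 : Nat) : Int) = (ym : Int) / 2 ^ 8 := by
        rw [Int.natCast_div]; norm_num
      rw [shl, Int.shiftLeft_eq, hv, hchunk, hdx, hdy]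
      rw [(show (2:Int) ^ (s + 16) = 2 ^ s * 2 ^ 16 by rw [pow_add])]
      ring

theorem morton_encode_alt_eq_ilv (x y : Int) (n : Nat) (hn : 0 < n) :
    morton_encode_alt x y (n : Int) = ilv n x y := by
  unfold morton_encode_alt
  rw [if_neg (by omega : ¬ ((n:Int) ≤ 0))]
  simp only [Int.toNat_natCast]
  rw [band_mask, band_mask]
  have hnn : (0:Int) < 2 ^ n := by positivity
  have hx0 : 0 ≤ x % 2 ^ n := Int.emod_nonneg x (by omega)
  have hxlt : x % 2 ^ n < 2 ^ n := Int.emod_lt_of_pos x hnn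
  have hy0 : 0 ≤ y % 2 ^ n := Int.emod_nonneg y (by omega)
  have hylt : y % 2 ^ n < 2 ^ n := Int.emod_lt_of_pos y hnn
  have hcx : (((x % 2 ^ n).toNat : Nat) : Int) = x % 2 ^ n := by omega
  have hcy : (((y % 2 ^ n).toNat : Nat) : Int) = y % 2 ^ n := by omega
  have hcastp : ((2 ^ n : Nat) : Int) = 2 ^ n := by push_cast; ring
  have hpow : (2:Nat) ^ n ≤ 2 ^ (8 * n) := Nat.pow_le_pow_right (by norm_num) (by omega)
  have hbx : (x % 2 ^ n).toNat < 2 ^ (8 * n) := by omega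
  have hby : (y % 2 ^ n).toNat < 2 ^ (8 * n) := by omega
  rw [mortonLoop_eq n _ _ 0 0 hbx hby, hcx, hcy]
  have hfuel : ilv (8 * n) (x % 2 ^ n) (y % 2 ^ n) = ilv n (x % 2 ^ n) (y % 2 ^ n) := by
    rw [(show 8 * n = n + 7 * n by ring), ilv_chunk,
      Int.ediv_eq_zero_of_lt hx0 hxlt, Int.ediv_eq_zero_of_lt hy0 hylt, ilv_zero]
    ring
  rw [hfuel, ilv_mod]
  ring

-- ===== VERDICT (by name: the statement is the Claim_ definition above) =====
theorem morton_encode_spec : Claim_equal_morton_encode := by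
  intro x y b _
  unfold Spec_morton_encode
  by_cases hb : b ≤ 0
  · have h1 : morton_encode x y b = 0 := by
      unfold morton_encode
      rw [PySem.List.pyRange_one_eq_nil hb]
      rfl
    have h2 : morton_encode_alt x y b = 0 := by
      unfold morton_encode_alt
      simp [hb]
    rw [h1, h2]
  · have hbn : b = ((b.toNat : Nat) : Int) := by omega
    rw [hbn, morton_encode_eq_ilv, morton_encode_alt_eq_ilv x y b.toNat (by omega)]
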